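-- pv_equiv track=rewrite | github.com/Ath-07/TensorTonic-Solutions | max-pooling-2d/max-pooling-2d.py | max_pooling_2d
-- ===== SOURCE A (Python) =====
-- def max_pooling_2d(X, pool_size):
--     """
--     Apply 2D max pooling with non-overlapping windows.
--     """
--     # Write code here
--     h = len(X)
--     w = len(X[0])
--
--     h_out = h // pool_size
--     w_out = w // pool_size
--
--     p = pool_size
--
--     out = [[0 for _ in range(w_out)] for _ in range(h_out)]
--
--     for i in range(h_out):
--         for j in range(w_out):
--             maximum = float('-inf')
--             for a in range(p):
--                 for b in range(p):
--                     maximum = max(maximum, X[i*p+a][j*p+b])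
--             out[i][j] = maximum
--
--     return out
-- ===== SOURCE B (Python) =====
-- def max_pooling_2d(X, pool_size):
--     """
--     Apply 2D max pooling with non-overlapping windows.
--
--     One pass over the input: each element is scattered (via integer division)
--     into the output cell that owns it, instead of gathering each window.
--     """
--     w = len(X[0])
--     p = pool_size
--     h_out = len(X) // p
--     w_out = w // p
--
--     out = [[float('-inf')] * w_out for _ in range(h_out)]
--
--     for i in range(h_out * p):
--         row = X[i]
--         orow = out[i // p]
--         for j in range(w_out * p):
--             v = row[j]
--             c = j // p
--             if v > orow[c]:
--                 orow[c] = v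
--
--     return out
-- ===== Notes on version B (the rewrite author's own statement) =====
-- stated objective: alternative
-- what changed: Replaces A's gather (loop over output windows with 4 nested loops taking each window's max) by a single scatter pass over the input that folds each element X[i][j] into its owning output cell out[i//p][j//p] seeded with -inf.
-- outside the precondition, e.g. on max_pooling_2d([], 2): A raises IndexError, B raises IndexError; on max_pooling_2d([[1, 2], [3, 4]], 0): A raises ZeroDivisionError, B raises ZeroDivisionError; on max_pooling_2d([[1, 2], [3, 4]], -1): A returns [], B raises IndexError
import Mathlib
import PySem

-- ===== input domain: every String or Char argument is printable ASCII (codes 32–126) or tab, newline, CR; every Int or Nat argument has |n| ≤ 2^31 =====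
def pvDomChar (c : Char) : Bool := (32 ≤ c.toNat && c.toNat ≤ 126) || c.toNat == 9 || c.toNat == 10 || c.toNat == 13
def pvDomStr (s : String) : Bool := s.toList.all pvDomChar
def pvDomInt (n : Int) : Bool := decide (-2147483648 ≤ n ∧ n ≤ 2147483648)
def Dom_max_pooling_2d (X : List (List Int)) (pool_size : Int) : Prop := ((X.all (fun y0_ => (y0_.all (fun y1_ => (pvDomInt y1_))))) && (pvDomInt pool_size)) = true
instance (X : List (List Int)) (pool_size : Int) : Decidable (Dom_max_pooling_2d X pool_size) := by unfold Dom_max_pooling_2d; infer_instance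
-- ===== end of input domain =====

-- B replaces A's gather (loop over output windows with a 4-deep nested max) by a single
-- scatter pass over the input, folding each element into its owning output cell (objective: alternative).

-- ===== PORT A =====
-- 'maximum = float("-inf")' then 'maximum = max(maximum, v)': none encodes -inf (it never
-- survives: the window loops are nonempty whenever an output cell exists).
def pyMaxNegInf (m : Option Int) (v : Int) : Option Int :=
  match m with
  | none => some v
  | some m0 => some (max m0 v)

def max_pooling_2d (X : List (List Int)) (pool_size : Int) : List (List Int) :=
  let h : Int := (X.length : Int)
  let w : Int := ((PySem.List.pyGetD X 0 []).length : Int)   -- X[0]; default [] only outside Pre_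
  let h_out : Int := PySem.Int.floordiv h pool_size
  let w_out : Int := PySem.Int.floordiv w pool_size
  let p : Int := pool_size
  -- 'out = [[0]*w_out]*h_out' then out[i][j] = maximum: building the grid of computed values
  (PySem.List.pyRange 0 h_out 1).map (fun i =>
    (PySem.List.pyRange 0 w_out 1).map (fun j =>
      (((PySem.List.pyRange 0 p 1).foldl (fun m a =>
          (PySem.List.pyRange 0 p 1).foldl (fun m b =>
            pyMaxNegInf m (PySem.List.pyGetD (PySem.List.pyGetD X (i*p+a) []) (j*p+b) 0)) m)
        none)).getD 0))

-- ===== PORT B =====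
-- 'if v > orow[c]: orow[c] = v' on a cell seeded float('-inf'); none encodes -inf.
def scatterStep (c : Option Int) (v : Int) : Option Int :=
  match c with
  | none => some v
  | some m => if v > m then some v else some m

def max_pooling_2d_alt (X : List (List Int)) (pool_size : Int) : List (List Int) :=
  let w : Int := ((PySem.List.pyGetD X 0 []).length : Int)
  let p : Int := pool_size
  let h_out : Int := PySem.Int.floordiv (X.length : Int) p
  let w_out : Int := PySem.Int.floordiv w p
  -- out = [[float('-inf')] * w_out for _ in range(h_out)]
  let out0 : List (List (Option Int)) := List.replicate h_out.toNat (List.replicate w_out.toNat none)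
  -- Python mutates orow = out[i//p] in place; here that in-place write is List.modify at i//p
  let out := (PySem.List.pyRange 0 (h_out * p) 1).foldl (fun out i =>
    let row := PySem.List.pyGetD X i []
    (PySem.List.pyRange 0 (w_out * p) 1).foldl (fun out j =>
      out.modify (PySem.Int.floordiv i p).toNat (fun orow =>
        orow.modify (PySem.Int.floordiv j p).toNat
          (fun c => scatterStep c (PySem.List.pyGetD row j 0)))) out) out0
  out.map (fun r => r.map (fun c => c.getD 0))

-- ===== PRECONDITION & SPEC =====
-- Pre_ excludes: empty X (A raises IndexError at X[0]); pool_size ≤ 0 (ZeroDivisionError at 0;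
-- a negative pool size is outside the natural domain of pooling — A happens to return [] there,
-- B raises); and inputs whose rows inside the pooled region are shorter than the pooled width
-- w_out*pool_size computed from row 0 (A raises IndexError).
def Pre_max_pooling_2d (X : List (List Int)) (pool_size : Int) : Prop :=
  X ≠ [] ∧ 1 ≤ pool_size ∧
  ∀ row ∈ X.take (X.length / pool_size.toNat * pool_size.toNat),
    (PySem.List.pyGetD X 0 []).length / pool_size.toNat * pool_size.toNat ≤ row.length
instance (X : List (List Int)) (pool_size : Int) : Decidable (Pre_max_pooling_2d X pool_size) := by
  unfold Pre_max_pooling_2d; infer_instance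

def pvWitness_max_pooling_2d : List (List Int) × Int := ([[1, 2], [3, 4]], 2)

def Spec_max_pooling_2d (X : List (List Int)) (pool_size : Int) (out : List (List Int)) : Prop := out = max_pooling_2d_alt X pool_size
instance (X : List (List Int)) (pool_size : Int) (out : List (List Int)) : Decidable (Spec_max_pooling_2d X pool_size out) := by unfold Spec_max_pooling_2d; infer_instance

-- ===== CLAIM (what is proved, stated in full; the proofs are below) =====
def Claim_equal_max_pooling_2d : Prop := ∀ (X : List (List Int)) (pool_size : Int), Dom_max_pooling_2d X pool_size → Pre_max_pooling_2d X pool_size → Spec_max_pooling_2d X pool_size (max_pooling_2d X pool_size)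

-- ===== LEMMAS AND PROOFS =====

theorem pv_modify_id {α : Type} (l : List α) (n : ℕ) :
    l.modify n (fun x => x) = l := by
  apply List.ext_getElem (by simp)
  intro i h1 h2
  simp [List.getElem_modify]

theorem pv_modify_modify {α : Type} (l : List α) (n : ℕ) (f g : α → α) :
    (l.modify n f).modify n g = l.modify n (fun x => g (f x)) := by
  apply List.ext_getElem (by simp)
  intro i h1 h2
  simp [List.getElem_modify]
  split <;> simp

theorem pv_foldl_modify_fixed {α γ : Type} (as : List γ) (n : ℕ) (f : γ → α → α) :
    ∀ (l : List α),
      as.foldl (fun acc a => acc.modify n (f a)) l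
        = l.modify n (fun x => as.foldl (fun y a => f a y) x) := by
  induction as with
  | nil => intro l; simp [pv_modify_id]
  | cons a as ih =>
      intro l
      simp only [List.foldl_cons]
      rw [ih, pv_modify_modify]

theorem pv_modify_append_cons {α : Type} (M : List α) (y : α) (rest : List α) (g : α → α) :
    (M ++ y :: rest).modify M.length g = M ++ g y :: rest := by
  induction M with
  | nil => simp [List.modify]
  | cons m M ih => simpa [List.modify] using ih

-- scatter = gather, one dimension
theorem pv_scatter_gather {α : Type} (P : ℕ) (hP : 0 < P) (f : ℕ → α → α) :
    ∀ (n : ℕ) (L : List α),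
      (List.range (n * P)).foldl (fun acc k => acc.modify (k / P) (f k)) L
        = (L.take n).mapIdx (fun r x => (List.range P).foldl (fun y a => f (r * P + a) y) x)
            ++ L.drop n := by
  intro n
  induction n with
  | zero => intro L; simp
  | succ n ih =>
      intro L
      have hrange : List.range ((n + 1) * P) = List.range (n * P) ++ (List.range P).map (fun a => n * P + a) := by
        rw [Nat.succ_mul, List.range_add]
      rw [hrange, List.foldl_append, ih, List.foldl_map]
      have hdiv : ∀ a, a < P → (n * P + a) / P = n := by
        intro a ha
        rw [Nat.mul_comm n P, Nat.mul_add_div hP, Nat.div_eq_of_lt ha, Nat.add_zero]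
      have hcongr :
          (List.range P).foldl
              (fun acc a => acc.modify ((n * P + a) / P) (f (n * P + a)))
              ((L.take n).mapIdx (fun r x => (List.range P).foldl (fun y a => f (r * P + a) y) x) ++ L.drop n)
            = (List.range P).foldl
              (fun acc a => acc.modify n (f (n * P + a)))
              ((L.take n).mapIdx (fun r x => (List.range P).foldl (fun y a => f (r * P + a) y) x) ++ L.drop n) := by
        apply PySem.List.foldl_congr_mem
        intro acc a ha
        rw [hdiv a (List.mem_range.mp ha)]
      rw [hcongr, pv_foldl_modify_fixed]
      by_cases hn : n < L.length
      · have htake : (L.take n).length = n := by simp [Nat.le_of_lt hn]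
        have hdrop : L.drop n = L[n] :: L.drop (n + 1) := List.drop_eq_getElem_cons hn
        rw [hdrop]
        have hM : ((L.take n).mapIdx (fun r x => (List.range P).foldl (fun y a => f (r * P + a) y) x)).length = n := by
          simp [htake]
        have hmod := pv_modify_append_cons
          ((L.take n).mapIdx (fun r x => (List.range P).foldl (fun y a => f (r * P + a) y) x))
          L[n] (L.drop (n + 1)) (fun x => (List.range P).foldl (fun y a => f (n * P + a) y) x)
        rw [hM] at hmod
        rw [hmod]
        have htake' : L.take (n + 1) = L.take n ++ [L[n]] := by
          rw [List.take_add_one]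
          simp [List.getElem?_eq_getElem hn]
        rw [htake', List.mapIdx_append]
        simp [htake]
      · have hle : L.length ≤ n := Nat.le_of_not_lt hn
        rw [List.modify_eq_self (by simp; omega)]
        rw [List.take_of_length_le hle, List.take_of_length_le (by omega),
            List.drop_of_length_le hle, List.drop_of_length_le (by omega)]

theorem pv_mapIdx_id {α : Type} (l : List α) : l.mapIdx (fun _ x => x) = l := by
  apply List.ext_getElem (by simp)
  intro i h1 h2
  simp

theorem pv_mapIdx_comp {α β γ : Type} (l : List α) (f : ℕ → α → β) (g : ℕ → β → γ) :
    (l.mapIdx f).mapIdx g = l.mapIdx (fun i x => g i (f i x)) := by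
  apply List.ext_getElem (by simp)
  intro i h1 h2
  simp [List.getElem_mapIdx]

theorem pv_mapIdx_replicate {α β : Type} (n : ℕ) (x : α) (f : ℕ → α → β) :
    (List.replicate n x).mapIdx f = (List.range n).map (fun i => f i x) := by
  apply List.ext_getElem (by simp)
  intro i h1 h2
  simp [List.getElem_mapIdx]

-- a fold of per-index rewrites is a per-index fold
theorem pv_foldl_of_pointwise {α γ : Type} (as : List γ) (F : γ → List α → List α)
    (g : γ → ℕ → α → α) (m : ℕ)
    (hF : ∀ a L, L.length = m → F a L = L.mapIdx (fun c x => g a c x)) :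
    ∀ (L : List α), L.length = m →
      as.foldl (fun L a => F a L) L = L.mapIdx (fun c x => as.foldl (fun y a => g a c y) x) := by
  induction as with
  | nil => intro L _; simp [pv_mapIdx_id]
  | cons a as ih =>
      intro L hL
      simp only [List.foldl_cons]
      rw [hF a L hL, ih (L.mapIdx (fun c x => g a c x)) (by simp [hL]), pv_mapIdx_comp]

theorem pv_step_eq : pyMaxNegInf = scatterStep := by
  funext m v
  cases m with
  | none => rfl
  | some m0 =>
      simp only [pyMaxNegInf, scatterStep, max_def, gt_iff_lt]
      split <;> split <;> first | rfl | (congr 1; omega)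

-- the common per-cell value both ports compute, scatter order
def pvCell (X : List (List Int)) (P r c : ℕ) : Option Int :=
  (List.range P).foldl (fun y a =>
    (List.range P).foldl (fun y b =>
      scatterStep y ((X.getD (r * P + a) []).getD (c * P + b) 0)) y) none

theorem pvA_char (X : List (List Int)) (P : ℕ) :
    max_pooling_2d X (P : Int)
      = (List.range (X.length / P)).map (fun r =>
          (List.range ((PySem.List.pyGetD X 0 []).length / P)).map
            (fun c => (pvCell X P r c).getD 0)) := by
  unfold max_pooling_2d pvCell
  rw [pv_step_eq]
  simp only [PySem.Int.floordiv_natCast, PySem.List.pyRange_zero_natCast, List.map_map,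
    List.foldl_map, Function.comp_def, ← Nat.cast_mul, ← Nat.cast_add,
    PySem.List.pyGetD_natCast]

theorem pvB_char (X : List (List Int)) (P : ℕ) (hP : 0 < P) :
    max_pooling_2d_alt X (P : Int)
      = (List.range (X.length / P)).map (fun r =>
          (List.range ((PySem.List.pyGetD X 0 []).length / P)).map
            (fun c => (pvCell X P r c).getD 0)) := by
  unfold max_pooling_2d_alt
  simp only [PySem.Int.floordiv_natCast, PySem.List.pyRange_zero_natCast,
    List.foldl_map, ← Nat.cast_mul, PySem.List.pyGetD_natCast, Int.toNat_natCast]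
  simp only [pv_foldl_modify_fixed]
  rw [pv_scatter_gather P hP]
  simp only [List.take_replicate, Nat.min_self, List.drop_replicate, Nat.sub_self,
    List.replicate_zero, List.append_nil, pv_mapIdx_replicate, List.map_map,
    Function.comp_def]
  apply List.map_congr_left
  intro r _
  rw [pv_foldl_of_pointwise (List.range P)
        (fun a L => (List.range ((PySem.List.pyGetD X 0 []).length / P * P)).foldl
          (fun orow j => orow.modify (j / P)
            (fun c => scatterStep c ((X.getD (r * P + a) []).getD j 0))) L)
        (fun a c x => (List.range P).foldl
          (fun y b => scatterStep y ((X.getD (r * P + a) []).getD (c * P + b) 0)) x)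
        ((PySem.List.pyGetD X 0 []).length / P)
        ?_ (List.replicate ((PySem.List.pyGetD X 0 []).length / P) none) (by simp)]
  · rw [pv_mapIdx_replicate, List.map_map]
    rfl
  · intro a L hL
    dsimp only
    rw [pv_scatter_gather P hP]
    rw [List.take_of_length_le (by omega), List.drop_of_length_le (by omega),
        List.append_nil]

-- ===== VERDICT (by name: the statement is the Claim_ definition above) =====
theorem max_pooling_2d_spec : Claim_equal_max_pooling_2d := by
  intro X pool_size _ hPre
  obtain ⟨_, hp1, _⟩ := hPre
  obtain ⟨P, rfl⟩ : ∃ P : ℕ, pool_size = (P : Int) :=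
    ⟨pool_size.toNat, (Int.toNat_of_nonneg (by omega)).symm⟩
  have hP : 0 < P := by exact_mod_cast hp1
  unfold Spec_max_pooling_2d
  rw [pvA_char X P, pvB_char X P hP]
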